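-- pv_equiv track=rewrite | github.com/BlueTot/Drift-Boss-2D | pathgen.py | grid_path
-- ===== SOURCE A (Python) =====
-- def grid_path(direction):
--     grid = {}
--     if direction == "UP":
--         for x in range(8):
--             for y in range(8):
--                 if y % 2 == 0:
--                     grid[(x, -1 * y)] = 'regular'
--                 else:
--                     if (x + (y // 2) % 2) % 2 == 0:
--                         grid[(x, -1 * y)] = 'regular'
--         grid[(7, -7)] = 'regular'
--     else:
--         for x in range(8):
--             for y in range(8):
--                 if x % 2 == 0:
--                     grid[(y, -1 * x)] = 'regular'
--                 else:
--                     if (y + (x // 2) % 2) % 2 == 0: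
--                         grid[(y, -1 * x)] = 'regular'
--         grid[(7, -7)] = 'regular'
--     return grid
-- ===== SOURCE B (Python) =====
-- # Table-driven: the kept cells repeat with period 2 per column and period 4 per row,
-- # so B looks the coordinates up in precomputed tables instead of testing parities.
-- _COLS = [[0, 1, 2, 4, 5, 6], [0, 2, 3, 4, 6, 7]]          # rows kept in column x: _COLS[x % 2]
-- _ROWS = [[0, 1, 2, 3, 4, 5, 6, 7], [0, 2, 4, 6],
--          [0, 1, 2, 3, 4, 5, 6, 7], [1, 3, 5, 7]]          # cols kept in row r: _ROWS[r % 4]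
--
-- def grid_path(direction):
--     grid = {}
--     if direction == "UP":
--         for x in range(8):
--             for y in _COLS[x % 2]:
--                 grid[(x, -y)] = 'regular'
--     else:
--         for r in range(8):
--             for c in _ROWS[r % 4]:
--                 grid[(c, -r)] = 'regular'
--     return grid
-- ===== Notes on version B (the rewrite author's own statement) =====
-- stated objective: simpler
-- what changed: B replaces A's per-cell modular parity tests (and the redundant (7,-7) re-insert) with table-driven iteration: the kept coordinates are precomputed lists indexed by x%2 (column pattern) resp. r%4 (row pattern), so the inner loop runs only over kept cells with no conditionals.
import Mathlib
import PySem

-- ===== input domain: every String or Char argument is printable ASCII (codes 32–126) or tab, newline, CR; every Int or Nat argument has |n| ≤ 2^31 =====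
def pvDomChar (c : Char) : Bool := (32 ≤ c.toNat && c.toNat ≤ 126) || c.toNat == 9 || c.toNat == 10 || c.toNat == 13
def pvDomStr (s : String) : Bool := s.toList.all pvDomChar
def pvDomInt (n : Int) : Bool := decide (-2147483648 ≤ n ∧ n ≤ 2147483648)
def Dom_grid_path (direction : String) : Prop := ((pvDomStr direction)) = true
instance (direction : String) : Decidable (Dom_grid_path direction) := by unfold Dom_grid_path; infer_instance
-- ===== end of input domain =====

-- B builds the fixed grid table-driven (precomputed kept-coordinate lists indexed by
-- x%2 / r%4) instead of A's per-cell parity tests and redundant re-insert: simpler.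

-- ===== PORT A =====
def grid_path (direction : String) : List (Int × Int × String) :=
  let grid : PySem.Dict (Int × Int) String := PySem.Dict.empty
  let grid :=
    if direction == "UP" then
      let g := (PySem.List.pyRange 0 8 1).foldl (fun g x =>
        (PySem.List.pyRange 0 8 1).foldl (fun g y =>
          if PySem.Int.mod y 2 == 0 then
            PySem.Dict.insert g (x, -1 * y) "regular"
          else if PySem.Int.mod (x + PySem.Int.mod (PySem.Int.floordiv y 2) 2) 2 == 0 then
            PySem.Dict.insert g (x, -1 * y) "regular"
          else g) g) grid
      PySem.Dict.insert g ((7 : Int), (-7 : Int)) "regular"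
    else
      let g := (PySem.List.pyRange 0 8 1).foldl (fun g x =>
        (PySem.List.pyRange 0 8 1).foldl (fun g y =>
          if PySem.Int.mod x 2 == 0 then
            PySem.Dict.insert g (y, -1 * x) "regular"
          else if PySem.Int.mod (y + PySem.Int.mod (PySem.Int.floordiv x 2) 2) 2 == 0 then
            PySem.Dict.insert g (y, -1 * x) "regular"
          else g) g) grid
      PySem.Dict.insert g ((7 : Int), (-7 : Int)) "regular"
  grid.items.map (fun p => (p.1.1, p.1.2, p.2))

-- ===== PORT B =====
-- the two lookup tables of Source B (list indexing is always in range, so getD [] is exact)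
def pvCols : List (List Int) := [[0, 1, 2, 4, 5, 6], [0, 2, 3, 4, 6, 7]]
def pvRows : List (List Int) :=
  [[0, 1, 2, 3, 4, 5, 6, 7], [0, 2, 4, 6], [0, 1, 2, 3, 4, 5, 6, 7], [1, 3, 5, 7]]

def grid_path_alt (direction : String) : List (Int × Int × String) :=
  let grid : PySem.Dict (Int × Int) String := PySem.Dict.empty
  let grid :=
    if direction == "UP" then
      (PySem.List.pyRange 0 8 1).foldl (fun g x =>
        ((PySem.List.pyGet? pvCols (PySem.Int.mod x 2)).getD []).foldl (fun g y =>
          PySem.Dict.insert g (x, -y) "regular") g) grid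
    else
      (PySem.List.pyRange 0 8 1).foldl (fun g r =>
        ((PySem.List.pyGet? pvRows (PySem.Int.mod r 4)).getD []).foldl (fun g c =>
          PySem.Dict.insert g (c, -r) "regular") g) grid
  grid.items.map (fun p => (p.1.1, p.1.2, p.2))

-- ===== PRECONDITION & SPEC =====
def Spec_grid_path (direction : String) (out : List (Int × Int × String)) : Prop := out = grid_path_alt direction
instance (direction : String) (out : List (Int × Int × String)) : Decidable (Spec_grid_path direction out) := by unfold Spec_grid_path; infer_instance

-- ===== CLAIM (what is proved, stated in full; the proofs are below) =====
def Claim_equal_grid_path : Prop := ∀ (direction : String), Dom_grid_path direction → Spec_grid_path direction (grid_path direction)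

-- ===== LEMMAS AND PROOFS =====

-- ===== VERDICT (by name: the statement is the Claim_ definition above) =====
set_option maxRecDepth 4000 in
theorem grid_path_spec : Claim_equal_grid_path := by
  intro d _
  unfold Spec_grid_path grid_path grid_path_alt
  rcases Bool.eq_false_or_eq_true (d == "UP") with h | h <;> simp only [h] <;> decide
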